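-- pv_equiv track=rewrite | github.com/DominicBurkart/afinn | afinn/afinn.py | find_valence
-- ===== SOURCE A (Python) =====
-- def find_valence(word_scores):
--     '''splits words to find valence. Called by other methods.
--
--        sets and resets valenceScores, which can be called to yield the valence scores (positive, negative, sum) for the most recent input.
--
--        Added by Dominic Burkart (dominicburkart@gmail.com).'''
--
--     valenceScores = [0,0,0]
--
--     for score in word_scores:
--         if score > 0:
--             valenceScores[0] += score
--         elif score < 0:
--             valenceScores[1] += abs(score) #absolute value taken for easier statistical manipulation, requested by julian
--
--         valenceScores[2] += score
--
--     return valenceScores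
-- ===== SOURCE B (Python) =====
-- def find_valence(word_scores):
--     lst = list(word_scores)
--     s = sum(lst)
--     a = sum(map(abs, lst))
--     return [(a + s) // 2, (a - s) // 2, s]
-- ===== Notes on version B (the rewrite author's own statement) =====
-- stated objective: alternative
-- what changed: B computes only the total sum s and the sum of absolute values a, then recovers the positive and |negative| components arithmetically as (a+s)//2 and (a-s)//2, eliminating A's per-element sign branching and 3-cell accumulator.
import Mathlib
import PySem

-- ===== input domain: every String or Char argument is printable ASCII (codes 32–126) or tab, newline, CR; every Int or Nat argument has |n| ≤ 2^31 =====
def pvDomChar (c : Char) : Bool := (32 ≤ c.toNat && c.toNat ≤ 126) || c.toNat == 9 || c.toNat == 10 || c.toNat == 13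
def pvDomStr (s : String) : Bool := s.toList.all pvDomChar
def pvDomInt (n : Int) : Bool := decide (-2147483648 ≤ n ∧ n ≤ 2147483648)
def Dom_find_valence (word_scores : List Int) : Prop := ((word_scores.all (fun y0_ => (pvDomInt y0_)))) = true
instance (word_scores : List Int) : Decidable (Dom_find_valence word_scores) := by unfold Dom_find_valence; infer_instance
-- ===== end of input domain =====

-- B derives the positive and |negative| components arithmetically from the total sum and the
-- sum of absolute values ((a+s)//2 and (a-s)//2), removing A's per-element sign branching.
-- ===== PORT A =====
-- Port of A: single fold over the list carrying (pos, neg, total), branch order as in A.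
def find_valence (word_scores : List Int) : List Int :=
  let vs := word_scores.foldl
    (fun (v : Int × Int × Int) score =>
      let v0 := if score > 0 then (v.1 + score, v.2.1, v.2.2)
                else if score < 0 then (v.1, v.2.1 + |score|, v.2.2)
                else v
      (v0.1, v0.2.1, v0.2.2 + score))
    (0, 0, 0)
  [vs.1, vs.2.1, vs.2.2]

-- ===== PORT B =====
-- Port of B: total sum s, sum of absolute values a, then (a+s)//2 and (a-s)//2 (Python //).
def find_valence_alt (word_scores : List Int) : List Int :=
  let s := word_scores.sum
  let a := (word_scores.map (fun x => |x|)).sum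
  [PySem.Int.floordiv (a + s) 2, PySem.Int.floordiv (a - s) 2, s]

-- ===== PRECONDITION & SPEC =====
def Spec_find_valence (word_scores : List Int) (out : List Int) : Prop := out = find_valence_alt word_scores
instance (word_scores : List Int) (out : List Int) : Decidable (Spec_find_valence word_scores out) := by unfold Spec_find_valence; infer_instance

-- ===== CLAIM (what is proved, stated in full; the proofs are below) =====
def Claim_equal_find_valence : Prop := ∀ (word_scores : List Int), Dom_find_valence word_scores → Spec_find_valence word_scores (find_valence word_scores)

-- ===== LEMMAS AND PROOFS =====
-- A's fold computes (positive sum, |negative| sum, total) added to the seed.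
theorem fv_fold (l : List Int) (p n t : Int) :
    l.foldl
      (fun (v : Int × Int × Int) score =>
        let v0 := if score > 0 then (v.1 + score, v.2.1, v.2.2)
                  else if score < 0 then (v.1, v.2.1 + |score|, v.2.2)
                  else v
        (v0.1, v0.2.1, v0.2.2 + score))
      (p, n, t)
    = (p + ((l.filter (fun x => x > 0))).sum,
       n + ((l.filter (fun x => x < 0)).map (fun x => -x)).sum,
       t + l.sum) := by
  induction l generalizing p n t with
  | nil => simp
  | cons a l ih =>
    simp only [List.foldl_cons, List.filter_cons, List.sum_cons]
    rcases lt_trichotomy a 0 with h | h | h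
    · have hng : ¬ a > 0 := by omega
      simp only [hng, h, decide_true, decide_false, ih,
        List.sum_cons, ite_true, ite_false]
      refine Prod.ext ?_ (Prod.ext ?_ ?_) <;> simp [abs_of_neg h] <;> ring
    · subst h
      simp only [gt_iff_lt, lt_irrefl, decide_false, ite_false, ih]
      simp
    · have hng : ¬ a < 0 := by omega
      simp only [hng, h, decide_true, decide_false, ih, List.map_cons,
        List.sum_cons, ite_true, ite_false]
      refine Prod.ext ?_ (Prod.ext ?_ ?_) <;> simp <;> ring_nf

-- Sum of absolute values = positive sum + |negative| sum; total = positive sum − |negative| sum.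
theorem fv_abs_sum (l : List Int) :
    (l.map (fun x => |x|)).sum
      = (l.filter (fun x => x > 0)).sum + ((l.filter (fun x => x < 0)).map (fun x => -x)).sum := by
  induction l with
  | nil => simp
  | cons a l ih =>
    simp only [List.map_cons, List.sum_cons, List.filter_cons]
    rcases lt_trichotomy a 0 with h | h | h
    · have hng : ¬ a > 0 := by omega
      simp [hng, h, ih, abs_of_neg h]
      ring
    · subst h
      simp [ih]
    · have hng : ¬ a < 0 := by omega
      simp [hng, h, ih, abs_of_pos h]
      ring

theorem fv_sum (l : List Int) :
    l.sum
      = (l.filter (fun x => x > 0)).sum - ((l.filter (fun x => x < 0)).map (fun x => -x)).sum := by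
  induction l with
  | nil => simp
  | cons a l ih =>
    simp only [List.sum_cons, List.filter_cons]
    rcases lt_trichotomy a 0 with h | h | h
    · have hng : ¬ a > 0 := by omega
      simp [hng, h, ih]
      ring
    · subst h
      simp [ih]
    · have hng : ¬ a < 0 := by omega
      simp [hng, h, ih]
      ring

theorem fv_floordiv_double (k : Int) : PySem.Int.floordiv (2 * k) 2 = k := by
  rw [PySem.Int.floordiv_eq_ediv_of_pos (by omega : (0:Int) < 2)]
  omega

-- ===== VERDICT (by name: the statement is the Claim_ definition above) =====
theorem find_valence_spec : Claim_equal_find_valence := by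
  intro ws _
  unfold Spec_find_valence find_valence find_valence_alt
  rw [fv_fold]
  simp only [zero_add]
  have h1 : (ws.map (fun x => |x|)).sum + ws.sum
      = 2 * (ws.filter (fun x => x > 0)).sum := by
    rw [fv_abs_sum ws, fv_sum ws]; ring
  have h2 : (ws.map (fun x => |x|)).sum - ws.sum
      = 2 * ((ws.filter (fun x => x < 0)).map (fun x => -x)).sum := by
    rw [fv_abs_sum ws, fv_sum ws]; ring
  simp only [h1, h2, fv_floordiv_double]
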